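-- pv_equiv track=rewrite | github.com/agam-lang/benchmarks | suites/02_numerical_computation/comparisons/polynomial_eval.py | polynomial_cost
-- ===== SOURCE A (Python) =====
-- def polynomial_cost(points: int, degree: int) -> int:
--     checksum = 0
--     for p in range(points):
--         x = (p % 97) + 3
--         value = 1
--         for c in range(degree, 0, -1):
--             value = ((value * x) + ((c * 11) + (p % 29))) % 1000003
--         checksum += value
--     return checksum
-- ===== SOURCE B (Python) =====
-- def polynomial_cost(points: int, degree: int) -> int:
--     M = 1000003
--     P = 2813  # 97 * 29: (p % 97, p % 29) has period 2813 in p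
--     n = degree if degree > 0 else 0
--
--     def ghp(x, m):
--         # (sum_{c<m} x^c, sum_{c<m} c*x^c, x^m), all mod M, by halving
--         if m == 0:
--             return (0, 0, 1)
--         g, h, pw = ghp(x, m // 2)
--         k = m // 2
--         g2 = (g + g * pw) % M
--         h2 = (h + pw * (h + k * g)) % M
--         p2 = (pw * pw) % M
--         if m % 2 == 0:
--             return (g2, h2, p2)
--         return ((g2 + p2) % M, (h2 + 2 * k * p2) % M, (p2 * x) % M)
--
--     def inner(p):
--         x = (p % 97) + 3
--         r = p % 29
--         g, h, pw = ghp(x, n)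
--         return (pw + 11 * (h + g) + r * g) % M
--
--     if points <= P:
--         return sum(inner(p) for p in range(points))
--     vals = [inner(p) for p in range(P)]
--     return (points // P) * sum(vals) + sum(vals[:points % P])
-- ===== Notes on version B (the rewrite author's own statement) =====
-- stated objective: faster
-- what changed: B evaluates the polynomial once per residue class mod 2813 = 97*29 (the joint period of p%97 and p%29) and combines the class values by block counting (points//2813 full periods plus a prefix), and replaces the degree-step Horner loop by an O(log degree) halving recursion on the modular geometric sums sum x^c, sum c*x^c and the power x^degree.
import Mathlib
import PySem

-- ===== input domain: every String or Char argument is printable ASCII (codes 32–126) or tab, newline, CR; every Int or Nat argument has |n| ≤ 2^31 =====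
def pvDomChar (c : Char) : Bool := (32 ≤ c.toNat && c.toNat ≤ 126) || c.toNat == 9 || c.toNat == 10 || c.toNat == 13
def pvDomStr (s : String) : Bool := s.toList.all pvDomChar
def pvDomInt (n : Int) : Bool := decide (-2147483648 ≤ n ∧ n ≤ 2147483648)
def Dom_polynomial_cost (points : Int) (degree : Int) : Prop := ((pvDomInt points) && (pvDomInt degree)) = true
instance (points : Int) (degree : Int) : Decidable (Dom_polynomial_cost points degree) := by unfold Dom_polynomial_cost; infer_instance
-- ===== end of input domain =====

-- B replaces A's p-loop over all `points` indices by one evaluation per residue class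
-- mod 2813 = 97*29 (the period of (p%97, p%29)) combined by counting, and replaces the
-- degree-step Horner loop by a halving recursion on the geometric sums Σx^c, Σc·x^c and
-- the power x^degree; measurably faster.

-- ===== PORT A =====
def polynomial_cost (points : Int) (degree : Int) : Int :=
  (PySem.List.pyRange 0 points 1).foldl (fun checksum p =>
    let x := PySem.Int.mod p 97 + 3
    let value := (PySem.List.pyRange degree 0 (-1)).foldl
      (fun value c => PySem.Int.mod (value * x + (c * 11 + PySem.Int.mod p 29)) 1000003) 1
    checksum + value) 0

-- ===== PORT B =====
-- (Σ_{c<m} x^c, Σ_{c<m} c·x^c, x^m), all mod 1000003, by halving (Source B's `ghp`)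
def pvGHP (x : Int) (m : Nat) : Int × Int × Int :=
  if h : m = 0 then (0, 0, 1)
  else
    let t := pvGHP x (m / 2)
    let g := t.1
    let hh := t.2.1
    let pw := t.2.2
    let k := m / 2
    let g2 := PySem.Int.mod (g + g * pw) 1000003
    let h2 := PySem.Int.mod (hh + pw * (hh + (k : Int) * g)) 1000003
    let p2 := PySem.Int.mod (pw * pw) 1000003
    if m % 2 = 0 then (g2, h2, p2)
    else (PySem.Int.mod (g2 + p2) 1000003,
          PySem.Int.mod (h2 + 2 * (k : Int) * p2) 1000003,
          PySem.Int.mod (p2 * x) 1000003)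
  termination_by m
  decreasing_by exact Nat.div_lt_self (Nat.pos_of_ne_zero h) (by norm_num)

-- Source B's `inner`: n = degree if degree > 0 else 0 is degree.toNat
def pvInnerB (degree : Int) (p : Int) : Int :=
  let x := PySem.Int.mod p 97 + 3
  let r := PySem.Int.mod p 29
  let t := pvGHP x degree.toNat
  PySem.Int.mod (t.2.2 + 11 * (t.2.1 + t.1) + r * t.1) 1000003

def polynomial_cost_alt (points : Int) (degree : Int) : Int :=
  if points ≤ 2813 then
    ((PySem.List.pyRange 0 points 1).map (pvInnerB degree)).sum
  else
    let vals := (PySem.List.pyRange 0 2813 1).map (pvInnerB degree)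
    PySem.Int.floordiv points 2813 * vals.sum +
      (PySem.List.slice vals none (some (PySem.Int.mod points 2813))).sum

-- ===== PRECONDITION & SPEC =====
def Spec_polynomial_cost (points : Int) (degree : Int) (out : Int) : Prop := out = polynomial_cost_alt points degree
instance (points : Int) (degree : Int) (out : Int) : Decidable (Spec_polynomial_cost points degree out) := by unfold Spec_polynomial_cost; infer_instance

-- ===== CLAIM (what is proved, stated in full; the proofs are below) =====
def Claim_equal_polynomial_cost : Prop := ∀ (points : Int) (degree : Int), Dom_polynomial_cost points degree → Spec_polynomial_cost points degree (polynomial_cost points degree)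

-- ===== LEMMAS AND PROOFS =====

-- A's inner Horner loop, as a named function (definitionally equal to the inline loop in `polynomial_cost`).
def pvInnerA (degree : Int) (p : Int) : Int :=
  let x := PySem.Int.mod p 97 + 3
  (PySem.List.pyRange degree 0 (-1)).foldl
    (fun value c => PySem.Int.mod (value * x + (c * 11 + PySem.Int.mod p 29)) 1000003) 1

-- the exact power sum Σ_{c=1}^{n} (11c+r)·x^{c-1}
def pvT (x r : Int) (n : Nat) : Int :=
  ((List.range n).map (fun (c : Nat) => (11 * ((c : Int) + 1) + r) * x ^ c)).sum

theorem pvT_succ (x r : Int) (n : Nat) :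
    pvT x r (n + 1) = pvT x r n + (11 * ((n : Int) + 1) + r) * x ^ n := by
  simp [pvT, List.range_succ]

-- A's descending Horner loop computes (s·xⁿ + Σ (11c+r)x^{c-1}) mod M
theorem pvHorner_closed (x r : Int) : ∀ (n : Nat) (s : Int), 0 ≤ s → s < 1000003 →
    (PySem.List.pyRange (n : Int) 0 (-1)).foldl
      (fun value c => (value * x + (c * 11 + r)) % 1000003) s
    = (s * x ^ n + pvT x r n) % 1000003 := by
  intro n
  induction n with
  | zero =>
    intro s h0 h1
    rw [PySem.List.pyRange_neg_one_eq_nil (by norm_num)]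
    simp [pvT, Int.emod_eq_of_lt h0 h1]
  | succ n ih =>
    intro s h0 h1
    rw [PySem.List.pyRange_neg_one_cons (by exact_mod_cast Nat.succ_pos n)]
    have hc : ((n : Int) + 1 - 1) = (n : Int) := by ring
    push_cast
    rw [hc]
    have h2 : (0 : Int) < 1000003 := by norm_num
    rw [List.foldl_cons]
    rw [ih _ (Int.emod_nonneg _ (by norm_num)) (Int.emod_lt_of_pos _ h2)]
    rw [pvT_succ]
    have hm : ((s * x + (((n : Int) + 1) * 11 + r)) % 1000003 * x ^ n + pvT x r n) % 1000003
        = ((s * x + (((n : Int) + 1) * 11 + r)) * x ^ n + pvT x r n) % 1000003 :=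
      Int.ModEq.add_right _ (Int.ModEq.mul_right _ (Int.emod_emod_of_dvd _ dvd_rfl))
    rw [hm]
    ring_nf

theorem pvMod_big (a : Int) : PySem.Int.mod a 1000003 = a % 1000003 :=
  PySem.Int.mod_eq_emod_of_pos (by norm_num)

def pvG (x : Int) (n : Nat) : Int := ((List.range n).map (fun (c : Nat) => x ^ c)).sum
def pvH (x : Int) (n : Nat) : Int := ((List.range n).map (fun (c : Nat) => (c : Int) * x ^ c)).sum

theorem pvG_add (x : Int) (a b : Nat) : pvG x (a + b) = pvG x a + x ^ a * pvG x b := by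
  induction b with
  | zero => simp [pvG]
  | succ b ih =>
    rw [show a + (b + 1) = (a + b) + 1 from by omega]
    simp only [pvG, List.range_succ, List.map_append, List.sum_append, List.map_cons,
      List.map_nil, List.sum_cons, List.sum_nil, add_zero] at *
    rw [ih, pow_add]
    ring

theorem pvH_add (x : Int) (a b : Nat) :
    pvH x (a + b) = pvH x a + x ^ a * pvH x b + (a : Int) * x ^ a * pvG x b := by
  induction b with
  | zero => simp [pvH, pvG]
  | succ b ih =>
    rw [show a + (b + 1) = (a + b) + 1 from by omega]
    simp only [pvH, pvG, List.range_succ, List.map_append, List.sum_append, List.map_cons,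
      List.map_nil, List.sum_cons, List.sum_nil, add_zero] at *
    rw [ih]
    push_cast
    rw [pow_add]
    ring

theorem pvT_eq (x r : Int) (n : Nat) :
    pvT x r n = 11 * pvH x n + 11 * pvG x n + r * pvG x n := by
  induction n with
  | zero => simp [pvT, pvG, pvH]
  | succ n ih =>
    simp only [pvT, pvG, pvH, List.range_succ, List.map_append, List.sum_append, List.map_cons,
      List.map_nil, List.sum_cons, List.sum_nil, add_zero] at *
    rw [ih]
    ring

-- the halving recursion computes the three sums mod 1000003
theorem pvGHP_closed (x : Int) : ∀ (m : Nat),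
    pvGHP x m = (pvG x m % 1000003, pvH x m % 1000003, x ^ m % 1000003) := by
  intro m
  induction m using Nat.strong_induction_on with
  | _ m ih =>
    rw [pvGHP]
    by_cases h0 : m = 0
    · subst h0
      simp [pvG, pvH]
    · simp only [dif_neg h0, pvMod_big]
      rw [ih (m / 2) (Nat.div_lt_self (Nat.pos_of_ne_zero h0) (by norm_num))]
      dsimp only
      have hme : Int.ModEq 1000003 (pvG x (m / 2) % 1000003) (pvG x (m / 2)) :=
        Int.emod_emod_of_dvd _ dvd_rfl
      have hmh : Int.ModEq 1000003 (pvH x (m / 2) % 1000003) (pvH x (m / 2)) :=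
        Int.emod_emod_of_dvd _ dvd_rfl
      have hmp : Int.ModEq 1000003 (x ^ (m / 2) % 1000003) (x ^ (m / 2)) :=
        Int.emod_emod_of_dvd _ dvd_rfl
      have hg2 : (pvG x (m / 2) % 1000003 + pvG x (m / 2) % 1000003 * (x ^ (m / 2) % 1000003)) % 1000003
          = pvG x (m / 2 + m / 2) % 1000003 := by
        rw [pvG_add]
        exact Int.ModEq.add hme (hme.mul hmp) |>.trans (by rw [Int.ModEq]; ring_nf)
      have hh2 : (pvH x (m / 2) % 1000003
            + x ^ (m / 2) % 1000003 * (pvH x (m / 2) % 1000003 + (↑(m / 2) : Int) * (pvG x (m / 2) % 1000003))) % 1000003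
          = pvH x (m / 2 + m / 2) % 1000003 := by
        rw [pvH_add]
        exact Int.ModEq.add hmh (hmp.mul (hmh.add (Int.ModEq.mul_left _ hme))) |>.trans
          (by rw [Int.ModEq]; ring_nf)
      have hp2 : (x ^ (m / 2) % 1000003 * (x ^ (m / 2) % 1000003)) % 1000003
          = x ^ (m / 2 + m / 2) % 1000003 := by
        rw [pow_add]
        exact hmp.mul hmp
      by_cases hpar : m % 2 = 0
      · rw [if_pos hpar]
        conv_rhs => rw [show m = m / 2 + m / 2 from by omega]
        exact Prod.ext hg2 (Prod.ext hh2 hp2)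
      · rw [if_neg hpar]
        conv_rhs => rw [show m = m / 2 + m / 2 + 1 from by omega]
        have he : Int.ModEq 1000003 ((pvG x (m / 2) % 1000003 + pvG x (m / 2) % 1000003 * (x ^ (m / 2) % 1000003)) % 1000003)
            (pvG x (m / 2 + m / 2)) := by rw [hg2]; exact Int.emod_emod_of_dvd _ dvd_rfl
        have hf : Int.ModEq 1000003 ((pvH x (m / 2) % 1000003
              + x ^ (m / 2) % 1000003 * (pvH x (m / 2) % 1000003 + (↑(m / 2) : Int) * (pvG x (m / 2) % 1000003))) % 1000003)
            (pvH x (m / 2 + m / 2)) := by rw [hh2]; exact Int.emod_emod_of_dvd _ dvd_rfl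
        have hq : Int.ModEq 1000003 ((x ^ (m / 2) % 1000003 * (x ^ (m / 2) % 1000003)) % 1000003)
            (x ^ (m / 2 + m / 2)) := by rw [hp2]; exact Int.emod_emod_of_dvd _ dvd_rfl
        refine Prod.ext ?_ (Prod.ext ?_ ?_)
        · show _ % 1000003 = pvG x (m / 2 + m / 2 + 1) % 1000003
          rw [pvG_add, show pvG x 1 = 1 from by simp [pvG]]
          exact (he.add hq).trans (by rw [Int.ModEq]; ring_nf)
        · show _ % 1000003 = pvH x (m / 2 + m / 2 + 1) % 1000003
          rw [pvH_add, show pvH x 1 = 0 from by simp [pvH], show pvG x 1 = 1 from by simp [pvG]]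
          have hcast : ((↑(m / 2 + m / 2) : Int)) = 2 * (↑(m / 2) : Int) := by push_cast; ring
          exact (hf.add (Int.ModEq.mul_left _ hq)).trans (by rw [Int.ModEq, hcast]; ring_nf)
        · show _ % 1000003 = x ^ (m / 2 + m / 2 + 1) % 1000003
          rw [pow_succ]
          exact hq.mul_right x

-- the two inner evaluations agree on every p and degree
theorem pvInner_eq (degree p : Int) : pvInnerA degree p = pvInnerB degree p := by
  unfold pvInnerA pvInnerB
  simp only [pvMod_big]
  rw [pvGHP_closed]
  by_cases hd : degree ≤ 0
  · rw [PySem.List.pyRange_neg_one_eq_nil hd, Int.toNat_of_nonpos hd]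
    simp [pvG, pvH]
  · have hd0 : 0 ≤ degree := by omega
    obtain ⟨n, hn⟩ : ∃ n : Nat, degree = (n : Int) := ⟨degree.toNat, (Int.toNat_of_nonneg hd0).symm⟩
    subst hn
    rw [Int.toNat_natCast]
    dsimp only
    rw [pvHorner_closed _ _ n 1 (by norm_num) (by norm_num), one_mul, pvT_eq]
    set X := PySem.Int.mod p 97 + 3
    set R := PySem.Int.mod p 29
    have hme : Int.ModEq 1000003 (pvG X n % 1000003) (pvG X n) := Int.emod_emod_of_dvd _ dvd_rfl
    have hmh : Int.ModEq 1000003 (pvH X n % 1000003) (pvH X n) := Int.emod_emod_of_dvd _ dvd_rfl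
    have hmp : Int.ModEq 1000003 (X ^ n % 1000003) (X ^ n) := Int.emod_emod_of_dvd _ dvd_rfl
    have h1 : (X ^ n % 1000003 + 11 * (pvH X n % 1000003 + pvG X n % 1000003)
          + R * (pvG X n % 1000003)) % 1000003
        = (X ^ n + 11 * (pvH X n + pvG X n) + R * pvG X n) % 1000003 :=
      Int.ModEq.add (Int.ModEq.add hmp ((hmh.add hme).mul_left 11)) (hme.mul_left _)
    rw [h1]
    congr 1
    ring

-- pvInnerB depends on p only through p mod 2813 = 97*29
theorem pvInnerB_period (degree : Int) (k : Nat) :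
    pvInnerB degree (k : Int) = pvInnerB degree ((k % 2813 : Nat) : Int) := by
  have e97 : PySem.Int.mod (k : Int) 97 = PySem.Int.mod ((k % 2813 : Nat) : Int) 97 := by
    rw [PySem.Int.mod_eq_emod_of_pos (by norm_num), PySem.Int.mod_eq_emod_of_pos (by norm_num)]
    omega
  have e29 : PySem.Int.mod (k : Int) 29 = PySem.Int.mod ((k % 2813 : Nat) : Int) 29 := by
    rw [PySem.Int.mod_eq_emod_of_pos (by norm_num), PySem.Int.mod_eq_emod_of_pos (by norm_num)]
    omega
  unfold pvInnerB
  rw [e97, e29]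

-- splitting a sum of a 2813-periodic function over an initial segment into full blocks + remainder
theorem pvSum_split (g : Nat → Int) (hper : ∀ k, g k = g (k % 2813)) :
    ∀ (q r : Nat), ((List.range (q * 2813 + r)).map g).sum
      = q * ((List.range 2813).map g).sum + ((List.range r).map g).sum := by
  intro q
  induction q with
  | zero => intro r; simp
  | succ q ih =>
    intro r
    have h : (q + 1) * 2813 + r = 2813 + (q * 2813 + r) := by ring
    rw [h, List.range_add, List.map_append, List.sum_append, List.map_map]
    have h2 : ((List.range (q * 2813 + r)).map (g ∘ (2813 + ·))).sum
        = ((List.range (q * 2813 + r)).map g).sum := by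
      congr 1
      apply List.map_congr_left
      intro a _
      simp only [Function.comp]
      rw [hper (2813 + a), Nat.add_mod_left]
      exact (hper a).symm
    rw [h2, ih]
    push_cast
    ring

-- a pyRange-0-n map as a List.range map
theorem pvMapRange (f : Int → Int) (n : Nat) :
    (PySem.List.pyRange 0 (n : Int) 1).map f
      = (List.range n).map (fun (k : Nat) => f (k : Int)) := by
  rw [PySem.List.pyRange_one, List.map_map]
  simp only [sub_zero, Int.toNat_natCast]
  apply List.map_congr_left
  intro a _
  simp [Function.comp]

-- ===== VERDICT (by name: the statement is the Claim_ definition above) =====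
theorem polynomial_cost_spec : Claim_equal_polynomial_cost := by
  intro points degree _
  unfold Spec_polynomial_cost
  have hA : polynomial_cost points degree
      = 0 + ((PySem.List.pyRange 0 points 1).map (pvInnerA degree)).sum :=
    PySem.List.foldl_add _ _ 0
  have hmapB : (PySem.List.pyRange 0 points 1).map (pvInnerA degree)
      = (PySem.List.pyRange 0 points 1).map (pvInnerB degree) :=
    List.map_congr_left (fun p _ => pvInner_eq degree p)
  rw [hA, zero_add, hmapB]
  by_cases hle : points ≤ 2813
  · rw [polynomial_cost_alt, if_pos hle]
  · simp only [polynomial_cost_alt, if_neg hle]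
    have hnn : 0 ≤ points := by omega
    obtain ⟨N, hN⟩ : ∃ N : Nat, points = (N : Int) := ⟨points.toNat, (Int.toNat_of_nonneg hnn).symm⟩
    subst hN
    have h2813 : ((2813 : Nat) : Int) = (2813 : Int) := by norm_num
    rw [← h2813, pvMapRange, pvMapRange]
    have hq : PySem.Int.floordiv (N : Int) ((2813 : Nat) : Int) = ((N / 2813 : Nat) : Int) :=
      PySem.Int.floordiv_natCast N 2813
    have hr : PySem.Int.mod (N : Int) ((2813 : Nat) : Int) = ((N % 2813 : Nat) : Int) :=
      PySem.Int.mod_natCast N 2813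
    rw [hq, hr, PySem.List.slice_to_natCast]
    set g : Nat → Int := fun k => pvInnerB degree (k : Int)
    have htake : ((List.range 2813).map g).take (N % 2813)
        = (List.range (N % 2813)).map g := by
      rw [← List.map_take, List.take_range, show min (N % 2813) 2813 = N % 2813 from by omega]
    rw [htake]
    have key : ((List.range N).map g).sum
        = ((N / 2813 : Nat) : Int) * ((List.range 2813).map g).sum
          + ((List.range (N % 2813)).map g).sum := by
      conv_lhs => rw [show N = N / 2813 * 2813 + N % 2813 from by omega]
      exact pvSum_split g (fun k => pvInnerB_period degree k) _ _
    exact key
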